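-- pv_equiv track=rewrite | github.com/lisabdj/Repliement-prot-MC | projet.py | energie_hydrophobe
-- ===== SOURCE A (Python) =====
-- def energie_hydrophobe(coordonnees, seq_HP):
--     """Calcul de l'énergie"""
--     pos_H = []
--     energie = 0
--     for i in range(len(seq_HP)):
--         if seq_HP[i] == "H":
--             pos_H.append(i)
--     for h in range(len(pos_H)):
--         for h1 in range(h, len(pos_H)):
--             if not (h1 == h + 1 or h1 == h):
--                 x1 = coordonnees[h][0]
--                 y1 = coordonnees[h][1]
--
--                 x2 = coordonnees[h1][0]
--                 y2 = coordonnees[h1][1]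
--
--                 if x1 == x2 or y1 == y2:
--                     energie += 1
--     return -energie
-- ===== SOURCE B (Python) =====
-- def energie_hydrophobe(coordonnees, seq_HP):
--     """One pass with hash counters over the first k coordinates (k = number of 'H'):
--     for each j, pairs (i, j) with i <= j-2 sharing an axis are counted by
--     inclusion-exclusion cx[x] + cy[y] - cp[(x, y)] over previously seen rows."""
--     k = 0
--     for c in seq_HP:
--         if c == "H":
--             k += 1
--     if k < 3:
--         return 0
--     cx = {}
--     cy = {}
--     cp = {}
--     energie = 0
--     for j in range(2, k):
--         row0 = coordonnees[j - 2]
--         x0, y0 = row0[0], row0[1]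
--         cx[x0] = cx.get(x0, 0) + 1
--         cy[y0] = cy.get(y0, 0) + 1
--         cp[(x0, y0)] = cp.get((x0, y0), 0) + 1
--         row = coordonnees[j]
--         x, y = row[0], row[1]
--         energie += cx.get(x, 0) + cy.get(y, 0) - cp.get((x, y), 0)
--     return -energie
-- ===== Notes on version B (the rewrite author's own statement) =====
-- stated objective: faster
-- what changed: Replaces the quadratic double loop over index pairs by a single pass that maintains hash counters of previously seen x-values, y-values and points, counting each row's non-adjacent axis-sharing partners by inclusion-exclusion in O(1).
import Mathlib
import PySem

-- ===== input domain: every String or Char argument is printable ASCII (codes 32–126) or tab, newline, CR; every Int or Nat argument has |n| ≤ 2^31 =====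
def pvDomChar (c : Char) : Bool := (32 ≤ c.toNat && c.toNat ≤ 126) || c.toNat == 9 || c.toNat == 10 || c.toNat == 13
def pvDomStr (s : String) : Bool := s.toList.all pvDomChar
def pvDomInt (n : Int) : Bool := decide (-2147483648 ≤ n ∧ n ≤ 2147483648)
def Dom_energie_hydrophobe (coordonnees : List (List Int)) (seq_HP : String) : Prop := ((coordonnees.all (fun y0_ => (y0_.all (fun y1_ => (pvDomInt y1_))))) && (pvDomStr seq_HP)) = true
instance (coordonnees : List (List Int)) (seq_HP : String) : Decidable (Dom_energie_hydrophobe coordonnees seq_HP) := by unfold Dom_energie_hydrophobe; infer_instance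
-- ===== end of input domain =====

-- B replaces A's quadratic double loop over index pairs by one pass with hash counters
-- (inclusion-exclusion per row); objective: faster.

-- ===== PORT A =====
-- seq_HP[i] (a 1-char string in Python) is ported as the character at index i, compared
-- with 'H'; indexing is via pyGetD (the string index is always in range; the coordinate
-- accesses are in range exactly on Pre_).
def energie_hydrophobe (coordonnees : List (List Int)) (seq_HP : String) : Int :=
  let pos_H : List Int :=
    (PySem.List.pyRange 0 (PySem.Str.len seq_HP)).foldl
      (fun pos_H i =>
        if PySem.List.pyGetD seq_HP.toList i ' ' == 'H' then pos_H ++ [i] else pos_H) []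
  let energie : Int :=
    (PySem.List.pyRange 0 (PySem.List.len pos_H)).foldl
      (fun energie h =>
        (PySem.List.pyRange h (PySem.List.len pos_H)).foldl
          (fun energie h1 =>
            if ¬ (h1 = h + 1 ∨ h1 = h) then
              let x1 := PySem.List.pyGetD (PySem.List.pyGetD coordonnees h []) 0 0
              let y1 := PySem.List.pyGetD (PySem.List.pyGetD coordonnees h []) 1 0
              let x2 := PySem.List.pyGetD (PySem.List.pyGetD coordonnees h1 []) 0 0
              let y2 := PySem.List.pyGetD (PySem.List.pyGetD coordonnees h1 []) 1 0
              if x1 == x2 || y1 == y2 then energie + 1 else energie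
            else energie)
          energie)
      0;
  -energie

-- ===== PORT B =====
-- state: (cx, cy, cp, energie) — counters of x-values, y-values and (x, y) points of
-- the rows 0 .. j-2 already seen, plus the running energy.
def energie_hydrophobe_alt (coordonnees : List (List Int)) (seq_HP : String) : Int :=
  let k : Int := seq_HP.toList.foldl (fun k c => if c == 'H' then k + 1 else k) 0
  if k < 3 then 0
  else
    let st : PySem.Dict Int Int × PySem.Dict Int Int × PySem.Dict (Int × Int) Int × Int :=
      (PySem.List.pyRange 2 k).foldl
        (fun st j =>
          let (cx, cy, cp, energie) := st
          let row0 := PySem.List.pyGetD coordonnees (j - 2) []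
          let x0 := PySem.List.pyGetD row0 0 0
          let y0 := PySem.List.pyGetD row0 1 0
          let cx := cx.insert x0 (cx.getD x0 0 + 1)
          let cy := cy.insert y0 (cy.getD y0 0 + 1)
          let cp := cp.insert (x0, y0) (cp.getD (x0, y0) 0 + 1)
          let row := PySem.List.pyGetD coordonnees j []
          let x := PySem.List.pyGetD row 0 0
          let y := PySem.List.pyGetD row 1 0
          (cx, cy, cp, energie + (cx.getD x 0 + cy.getD y 0 - cp.getD (x, y) 0)))
        (PySem.Dict.empty, PySem.Dict.empty, PySem.Dict.empty, 0);
    -st.2.2.2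

-- ===== PRECONDITION & SPEC =====
-- Pre_ excludes exactly the inputs on which Python A raises IndexError: when there are
-- k ≥ 3 'H' characters, A reads coordonnees[0..k-1][0] and [1].
def Pre_energie_hydrophobe (coordonnees : List (List Int)) (seq_HP : String) : Prop :=
  3 ≤ seq_HP.toList.count 'H' →
    (seq_HP.toList.count 'H' ≤ coordonnees.length ∧
     ∀ r ∈ coordonnees.take (seq_HP.toList.count 'H'), 2 ≤ r.length)
instance (coordonnees : List (List Int)) (seq_HP : String) : Decidable (Pre_energie_hydrophobe coordonnees seq_HP) := by unfold Pre_energie_hydrophobe; infer_instance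

def pvWitness_energie_hydrophobe : List (List Int) × String := ([[0, 0], [1, 0], [2, 5]], "HHH")

def Spec_energie_hydrophobe (coordonnees : List (List Int)) (seq_HP : String) (out : Int) : Prop := out = energie_hydrophobe_alt coordonnees seq_HP
instance (coordonnees : List (List Int)) (seq_HP : String) (out : Int) : Decidable (Spec_energie_hydrophobe coordonnees seq_HP out) := by unfold Spec_energie_hydrophobe; infer_instance

-- ===== CLAIM (what is proved, stated in full; the proofs are below) =====
def Claim_equal_energie_hydrophobe : Prop := ∀ (coordonnees : List (List Int)) (seq_HP : String), Dom_energie_hydrophobe coordonnees seq_HP → Pre_energie_hydrophobe coordonnees seq_HP → Spec_energie_hydrophobe coordonnees seq_HP (energie_hydrophobe coordonnees seq_HP)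

-- ===== LEMMAS AND PROOFS =====

def pvX (co : List (List Int)) (i : Int) : Int :=
  PySem.List.pyGetD (PySem.List.pyGetD co i []) 0 0
def pvY (co : List (List Int)) (i : Int) : Int :=
  PySem.List.pyGetD (PySem.List.pyGetD co i []) 1 0
def pvShare (co : List (List Int)) (i j : Int) : Bool :=
  (pvX co i == pvX co j) || (pvY co i == pvY co j)

theorem pv_countP_IE {α : Type} (l : List α) (p q : α → Bool) :
    l.countP p + l.countP q =
      l.countP (fun x => p x || q x) + l.countP (fun x => p x && q x) := by
  induction l with
  | nil => simp
  | cons x t ih =>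
    simp only [List.countP_cons]
    cases hp : p x <;> cases hq : q x <;> simp <;> omega

theorem pvA_inner (co : List (List Int)) (K h e : Int) :
    (PySem.List.pyRange h K).foldl
      (fun energie h1 =>
        if ¬ (h1 = h + 1 ∨ h1 = h) then
          (if PySem.List.pyGetD (PySem.List.pyGetD co h []) 0 0 ==
                PySem.List.pyGetD (PySem.List.pyGetD co h1 []) 0 0 ||
              PySem.List.pyGetD (PySem.List.pyGetD co h []) 1 0 ==
                PySem.List.pyGetD (PySem.List.pyGetD co h1 []) 1 0
           then energie + 1 else energie)
        else energie) e
    = e + ((PySem.List.pyRange (h + 2) K).countP (fun h1 => pvShare co h h1) : Int) := by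
  rw [PySem.List.foldl_congr_mem _ _
      (fun energie h1 =>
        if (¬ (h1 = h + 1 ∨ h1 = h)) ∧ pvShare co h h1 = true then energie + 1 else energie) e
      (by
        intro acc x hx
        by_cases hadj : x = h + 1 ∨ x = h
        · simp [hadj]
        · simp [pvShare, pvX, pvY, hadj])]
  rw [PySem.List.foldl_ite_add_one]
  congr 1
  norm_cast
  by_cases hK : h + 2 ≤ K
  · rw [PySem.List.pyRange_one_append h (h+2) K (by omega) hK, List.countP_append]
    have h2 : PySem.List.pyRange h (h+2) = [h, h+1] := by
      rw [PySem.List.pyRange_one_cons (by omega), PySem.List.pyRange_one_cons (by omega),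
          PySem.List.pyRange_one_eq_nil (by omega)]
    rw [h2]
    have hz : List.countP (fun x => decide (¬ (x = h + 1 ∨ x = h) ∧ pvShare co h x = true)) [h, h+1] = 0 := by
      simp
    rw [hz]
    have hc : List.countP (fun x => decide (¬ (x = h + 1 ∨ x = h) ∧ pvShare co h x = true))
        (PySem.List.pyRange (h+2) K) = List.countP (fun h1 => pvShare co h h1)
        (PySem.List.pyRange (h+2) K) := by
      apply List.countP_congr
      intro a ha
      rw [PySem.List.mem_pyRange_one] at ha
      have hna : ¬ (a = h + 1 ∨ a = h) := by omega
      simp [hna]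
    omega
  · rw [PySem.List.pyRange_one_eq_nil (by omega : K ≤ h + 2)]
    simp only [List.countP_nil]
    rw [List.countP_eq_zero]
    intro a ha
    rw [PySem.List.mem_pyRange_one] at ha
    have : a = h + 1 ∨ a = h := by omega
    simp [this]

def pvCnt (co : List (List Int)) (h K : Int) : Int :=
  ((PySem.List.pyRange (h + 2) K).countP (fun h1 => pvShare co h h1) : Int)

def pvC (co : List (List Int)) (j : Int) : Int :=
  ((PySem.List.pyRange 0 (j - 1)).countP (fun i => pvShare co i j) : Int)

def pvT (co : List (List Int)) : Nat → Int
  | 0 => 0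
  | n + 1 => pvT co n + pvC co (2 + (n : Int))

theorem pvSum_eq_pvT (co : List (List Int)) (K : Nat) :
    ((PySem.List.pyRange 0 (K : Int)).map (fun h => pvCnt co h (K : Int))).sum
      = pvT co (K - 2) := by
  induction K with
  | zero => simp [PySem.List.pyRange_one_eq_nil, pvT]
  | succ K ih =>
    by_cases hK2 : K < 2
    · interval_cases K
      · have h1 : PySem.List.pyRange (0:Int) 1 = [0] := by decide
        have h2 : PySem.List.pyRange (2:Int) 1 = [] := by decide
        simp [h1, pvCnt, h2, pvT]
      · have h1 : PySem.List.pyRange (0:Int) 2 = [0, 1] := by decide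
        have h2 : PySem.List.pyRange (2:Int) 2 = [] := by decide
        have h3 : PySem.List.pyRange (3:Int) 2 = [] := by decide
        simp [h1, pvCnt, h2, h3, pvT]
    · push_cast
      rw [PySem.List.pyRange_one_succ_right (by omega : (0:Int) ≤ (K:Int)),
          List.map_append, List.sum_append]
      have hlast : ((List.map (fun h => pvCnt co h ((K:Int)+1)) [(K:Int)]).sum) = 0 := by
        simp [pvCnt, PySem.List.pyRange_one_eq_nil (by omega : (K:Int)+1 ≤ (K:Int)+2)]
      rw [hlast]
      have hpt : ∀ h ∈ PySem.List.pyRange 0 (K:Int),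
          pvCnt co h ((K:Int)+1)
            = pvCnt co h (K:Int)
              + (if h + 2 ≤ (K:Int) ∧ pvShare co h (K:Int) = true then 1 else 0) := by
        intro h hh
        rw [PySem.List.mem_pyRange_one] at hh
        by_cases h2 : h + 2 ≤ (K:Int)
        · rw [pvCnt, pvCnt, PySem.List.pyRange_one_succ_right h2, List.countP_append]
          by_cases hs : pvShare co h (K:Int) = true
          · simp [hs, h2]
          · simp [hs, h2]
        · rw [pvCnt, pvCnt, PySem.List.pyRange_one_eq_nil (by omega : (K:Int)+1 ≤ h+2),
              PySem.List.pyRange_one_eq_nil (by omega : (K:Int) ≤ h+2)]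
          simp [h2]
      rw [List.map_congr_left hpt, PySem.List.sum_map_add_int, ih]
      have hdelta :
          ((PySem.List.pyRange 0 (K:Int)).map
            (fun h => if h + 2 ≤ (K:Int) ∧ pvShare co h (K:Int) = true then (1:Int) else 0)).sum
          = pvC co (K:Int) := by
        rw [PySem.List.pyRange_one_append 0 ((K:Int)-1) (K:Int) (by omega) (by omega),
            List.map_append, List.sum_append]
        have hsing : PySem.List.pyRange ((K:Int)-1) (K:Int) = [(K:Int)-1] := by
          rw [PySem.List.pyRange_one_cons (by omega), PySem.List.pyRange_one_eq_nil (by omega)]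
        rw [hsing]
        have hz : ((List.map
            (fun h => if h + 2 ≤ (K:Int) ∧ pvShare co h (K:Int) = true then (1:Int) else 0)
            [(K:Int)-1]).sum) = 0 := by
          simp
          intro hc
          omega
        rw [hz, add_zero]
        have hpt2 : ∀ h ∈ PySem.List.pyRange 0 ((K:Int)-1),
            (if h + 2 ≤ (K:Int) ∧ pvShare co h (K:Int) = true then (1:Int) else 0)
              = (if pvShare co h (K:Int) = true then (1:Int) else 0) := by
          intro h hh
          rw [PySem.List.mem_pyRange_one] at hh
          simp [show h + 2 ≤ (K:Int) from by omega]
        rw [List.map_congr_left hpt2, PySem.List.sum_map_ite_one_zero, pvC]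
      rw [hdelta]
      have hT : pvT co (K - 1) = pvT co (K - 2) + pvC co (K:Int) := by
        have h1 : K - 1 = (K - 2) + 1 := by omega
        rw [h1, pvT]
        have h2 : (2 + ((K - 2 : Nat) : Int)) = (K:Int) := by
          push_cast [Nat.cast_sub (by omega : 2 ≤ K)]
          omega
        rw [h2]
      rw [hT]
      ring

theorem pvDictCount {k : Type} [BEq k] [LawfulBEq k] [DecidableEq k]
    (l : List k) (a v : k) :
    ((l.foldl (fun d x => d.insert x (d.getD x 0 + 1)) PySem.Dict.empty).insert a
        ((0:Int) + (l.count a : Int) + 1)).getD v 0 = (((l ++ [a]).count v : Nat) : Int) := by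
  rw [PySem.Dict.getD_insert, List.count_append]
  by_cases hv : v = a
  · subst hv
    simp
  · rw [if_neg hv, PySem.Dict.getD_foldl_insert_add_one, PySem.Dict.getD_empty]
    have : List.count v [a] = 0 := by
      simp [List.count_singleton]
      exact fun h => absurd h.symm hv
    rw [this]
    push_cast
    ring

theorem pvIE_step (co : List (List Int)) (n : Nat) :
    (((List.map (pvX co) (PySem.List.pyRange 0 (n:Int)) ++ [pvX co (n:Int)]).count
        (pvX co (2 + (n:Int))) : Nat) : Int)
    + (((List.map (pvY co) (PySem.List.pyRange 0 (n:Int)) ++ [pvY co (n:Int)]).count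
        (pvY co (2 + (n:Int))) : Nat) : Int)
    - (((List.map (fun i => (pvX co i, pvY co i)) (PySem.List.pyRange 0 (n:Int))
          ++ [(pvX co (n:Int), pvY co (n:Int))]).count
        ((pvX co (2 + (n:Int)), pvY co (2 + (n:Int)))) : Nat) : Int)
    = pvC co (2 + (n:Int)) := by
  have hR : PySem.List.pyRange 0 ((n:Int)+1) = PySem.List.pyRange 0 (n:Int) ++ [(n:Int)] :=
    PySem.List.pyRange_one_succ_right (by omega)
  have hx : List.map (pvX co) (PySem.List.pyRange 0 (n:Int)) ++ [pvX co (n:Int)]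
      = List.map (pvX co) (PySem.List.pyRange 0 ((n:Int)+1)) := by
    rw [hR, List.map_append]; rfl
  have hy : List.map (pvY co) (PySem.List.pyRange 0 (n:Int)) ++ [pvY co (n:Int)]
      = List.map (pvY co) (PySem.List.pyRange 0 ((n:Int)+1)) := by
    rw [hR, List.map_append]; rfl
  have hp : List.map (fun i => (pvX co i, pvY co i)) (PySem.List.pyRange 0 (n:Int))
        ++ [(pvX co (n:Int), pvY co (n:Int))]
      = List.map (fun i => (pvX co i, pvY co i)) (PySem.List.pyRange 0 ((n:Int)+1)) := by
    rw [hR, List.map_append]; rfl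
  rw [hx, hy, hp]
  simp only [List.count_eq_countP, List.countP_map, Function.comp_def]
  have hpairfun : (fun i => ((pvX co i, pvY co i) == (pvX co (2+(n:Int)), pvY co (2+(n:Int)))))
      = fun i => ((pvX co i == pvX co (2+(n:Int))) && (pvY co i == pvY co (2+(n:Int)))) := rfl
  rw [hpairfun]
  have hsharefun : (fun i => ((pvX co i == pvX co (2+(n:Int))) || (pvY co i == pvY co (2+(n:Int)))))
      = fun i => pvShare co i (2+(n:Int)) := rfl
  have hIE := pv_countP_IE (PySem.List.pyRange 0 ((n:Int)+1))
    (fun i => pvX co i == pvX co (2+(n:Int))) (fun i => pvY co i == pvY co (2+(n:Int)))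
  rw [hsharefun] at hIE
  have harith : (2 + (n:Int)) - 1 = (n:Int) + 1 := by ring
  rw [pvC, harith]
  omega


theorem pvB_fold (co : List (List Int)) (n : Nat) :
    (PySem.List.pyRange 2 (2 + (n : Int))).foldl
      (fun st j =>
        let (cx, cy, cp, energie) := st
        let row0 := PySem.List.pyGetD co (j - 2) []
        let x0 := PySem.List.pyGetD row0 0 0
        let y0 := PySem.List.pyGetD row0 1 0
        let cx := cx.insert x0 (cx.getD x0 0 + 1)
        let cy := cy.insert y0 (cy.getD y0 0 + 1)
        let cp := cp.insert (x0, y0) (cp.getD (x0, y0) 0 + 1)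
        let row := PySem.List.pyGetD co j []
        let x := PySem.List.pyGetD row 0 0
        let y := PySem.List.pyGetD row 1 0
        (cx, cy, cp, energie + (cx.getD x 0 + cy.getD y 0 - cp.getD (x, y) 0)))
      ((PySem.Dict.empty, PySem.Dict.empty, PySem.Dict.empty, 0) :
        PySem.Dict Int Int × PySem.Dict Int Int × PySem.Dict (Int × Int) Int × Int)
    = (((PySem.List.pyRange 0 (n : Int)).map (pvX co)).foldl
         (fun d x => d.insert x (d.getD x 0 + 1)) PySem.Dict.empty,
       ((PySem.List.pyRange 0 (n : Int)).map (pvY co)).foldl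
         (fun d x => d.insert x (d.getD x 0 + 1)) PySem.Dict.empty,
       ((PySem.List.pyRange 0 (n : Int)).map (fun i => (pvX co i, pvY co i))).foldl
         (fun d x => d.insert x (d.getD x 0 + 1)) PySem.Dict.empty,
       pvT co n) := by
  induction n with
  | zero =>
    have h1 : PySem.List.pyRange 2 (2 + ((0:Nat):Int)) = [] :=
      PySem.List.pyRange_one_eq_nil (by norm_num)
    have h2 : PySem.List.pyRange (0:Int) ((0:Nat):Int) = [] :=
      PySem.List.pyRange_one_eq_nil (by norm_num)
    rw [h1, h2]
    simp [pvT]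
  | succ n ih =>
    have hcast : (2 + ((n+1 : Nat) : Int)) = (2 + (n:Int)) + 1 := by push_cast; ring
    rw [hcast, PySem.List.pyRange_one_succ_right (by omega : (2:Int) ≤ 2 + (n:Int)),
        List.foldl_append, ih]
    have hcast2 : ((n+1 : Nat) : Int) = (n:Int) + 1 := by push_cast; ring
    rw [hcast2, PySem.List.pyRange_one_succ_right (by omega : (0:Int) ≤ (n:Int)),
        List.map_append, List.map_append, List.map_append,
        List.foldl_append, List.foldl_append, List.foldl_append]
    have hsub : (2 + (n:Int)) - 2 = (n:Int) := by ring
    simp only [List.foldl_cons, List.foldl_nil, List.map_cons, List.map_nil, hsub]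
    refine Prod.ext ?_ (Prod.ext ?_ (Prod.ext ?_ ?_))
    · simp [pvX]
    · simp [pvY]
    · simp [pvX, pvY]
    · simp only []
      -- energy component
      show pvT co n + _ = pvT co (n+1)
      rw [pvT]
      congr 1
      rw [PySem.Dict.getD_foldl_insert_add_one, PySem.Dict.getD_foldl_insert_add_one,
          PySem.Dict.getD_foldl_insert_add_one, PySem.Dict.getD_empty, PySem.Dict.getD_empty,
          PySem.Dict.getD_empty]
      rw [pvDictCount, pvDictCount, pvDictCount]
      exact pvIE_step co n

theorem pvA_eq_pvT (co : List (List Int)) (K : Nat) :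
    (PySem.List.pyRange 0 (K : Int)).foldl
      (fun energie h =>
        (PySem.List.pyRange h (K : Int)).foldl
          (fun energie h1 =>
            if ¬ (h1 = h + 1 ∨ h1 = h) then
              (if PySem.List.pyGetD (PySem.List.pyGetD co h []) 0 0 ==
                    PySem.List.pyGetD (PySem.List.pyGetD co h1 []) 0 0 ||
                  PySem.List.pyGetD (PySem.List.pyGetD co h []) 1 0 ==
                    PySem.List.pyGetD (PySem.List.pyGetD co h1 []) 1 0
               then energie + 1 else energie)
            else energie) energie) 0
    = pvT co (K - 2) := by
  rw [PySem.List.foldl_congr_mem _ _ (fun energie h => energie + pvCnt co h (K:Int)) 0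
      (by intro acc x _; exact pvA_inner co (K:Int) x acc)]
  rw [PySem.List.foldl_add, pvSum_eq_pvT]
  ring

theorem pvCount_H (s : String) :
    (List.filter (fun i => PySem.List.pyGetD s.toList i ' ' == 'H')
      (PySem.List.pyRange 0 (PySem.Str.len s))).length = s.toList.count 'H' := by
  rw [← List.countP_eq_length_filter]
  have hl : PySem.Str.len s = PySem.List.len s.toList := by
    simp [PySem.Str.len, PySem.List.len_eq]
  rw [hl]
  have := List.countP_map (p := fun c => c == 'H')
    (f := fun j => PySem.List.pyGetD s.toList j ' ')
    (l := PySem.List.pyRange 0 (PySem.List.len s.toList))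
  rw [PySem.List.map_pyGetD_pyRange_zero] at this
  simp only [Function.comp_def] at this
  rw [List.count_eq_countP, ← this]

-- ===== VERDICT (by name: the statement is the Claim_ definition above) =====
theorem energie_hydrophobe_spec : Claim_equal_energie_hydrophobe := by
  intro co s _ _
  unfold Spec_energie_hydrophobe
  unfold energie_hydrophobe energie_hydrophobe_alt
  dsimp only []
  rw [PySem.List.foldl_append_if_eq_filter (fun i => PySem.List.pyGetD s.toList i ' ' == 'H')]
  rw [List.nil_append, PySem.List.foldl_beq_add_one, PySem.List.len_eq, pvCount_H]
  rw [pvA_eq_pvT co (s.toList.count 'H')]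
  by_cases hc : s.toList.count 'H' < 3
  · rw [if_pos (by omega)]
    have h0 : s.toList.count 'H' - 2 = 0 := by omega
    rw [h0, pvT]
    ring
  · rw [if_neg (by omega)]
    have hn : ((s.toList.count 'H' : Nat) : Int) = 2 + ((s.toList.count 'H' - 2 : Nat) : Int) := by
      push_cast [Nat.cast_sub (by omega : 2 ≤ s.toList.count 'H')]
      ring
    rw [show (0 : Int) + ((s.toList.count 'H' : Nat) : Int) = ((s.toList.count 'H' : Nat) : Int) from by ring,
        hn, pvB_fold]
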